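-- pv_equiv track=rewrite | github.com/cetej/STOPA | scripts/combee.py | sqrt_partition
-- ===== SOURCE A (Python) =====
-- import math
-- from typing import Any, Callable, TypeVar
--
-- T = TypeVar("T")
--
-- def sqrt_partition(items: list[T], min_group: int = 2) -> list[list[T]]:
--     """Partition items into √n subgroups for hierarchical aggregation.
--
--     Returns list of subgroups, each with roughly √n items.
--     Ensures minimum group size to avoid degenerate single-item groups.
--     """
--     n = len(items)
--     if n <= min_group:
--         return [items]
--
--     k = max(min_group, int(math.sqrt(n)))
--     # Distribute items evenly across k groups
--     groups: list[list[T]] = [[] for _ in range(k)]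
--     for i, item in enumerate(items):
--         groups[i % k].append(item)
--
--     # Remove empty groups (shouldn't happen but be safe)
--     return [g for g in groups if g]
-- ===== SOURCE B (Python) =====
-- import math
--
--
-- def sqrt_partition(items, min_group=2):
--     """Partition items into sqrt(n) round-robin subgroups, one strided slice per group."""
--     n = len(items)
--     if n <= min_group:
--         return [items]
--     k = max(min_group, int(math.sqrt(n)))
--     return [items[j::k] for j in range(k)]
-- ===== Notes on version B (the rewrite author's own statement) =====
-- stated objective: idiomatic
-- what changed: Replaces the per-item pass that appends into k shared modulo buckets (plus a trailing empty-group filter) by building each group directly as a strided slice items[j::k], dropping the dead filter.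
import Mathlib
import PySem

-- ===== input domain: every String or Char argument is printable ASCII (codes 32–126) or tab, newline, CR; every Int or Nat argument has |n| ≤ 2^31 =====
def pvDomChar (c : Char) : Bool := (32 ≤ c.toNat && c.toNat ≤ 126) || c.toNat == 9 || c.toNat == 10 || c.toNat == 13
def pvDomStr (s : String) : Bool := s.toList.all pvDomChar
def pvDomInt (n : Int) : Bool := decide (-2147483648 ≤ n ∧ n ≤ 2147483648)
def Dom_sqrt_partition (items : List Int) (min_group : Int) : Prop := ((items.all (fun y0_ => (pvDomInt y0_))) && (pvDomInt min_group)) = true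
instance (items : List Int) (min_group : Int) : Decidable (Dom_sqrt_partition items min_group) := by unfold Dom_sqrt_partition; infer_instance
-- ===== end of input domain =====

-- B replaces A's single per-item pass into shared modulo buckets by building each group
-- directly as a strided slice items[j::k] (idiomatic; same O(n) total work).

-- ===== PORT A =====
-- int(math.sqrt(n)) is ported as Nat.sqrt; exact for every list length below 2^52.
def sqrt_partition (items : List Int) (min_group : Int) : List (List Int) :=
  let n : Int := items.length
  if n ≤ min_group then [items]
  else
    let k : Int := max min_group (Int.ofNat (Nat.sqrt items.length))
    -- groups = [[] for _ in range(k)]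
    let groups : List (List Int) := List.replicate k.toNat []
    -- for i, item in enumerate(items): groups[i % k].append(item)
    let groups := (PySem.List.enumerate items).foldl
      (fun gs p => gs.modify (PySem.Int.mod p.1 k).toNat (fun g => g ++ [p.2])) groups
    -- return [g for g in groups if g]
    groups.filter (fun g => !g.isEmpty)

-- ===== PORT B =====
-- hand port of the strided slice items[j::k]; exact for 0 ≤ j and step k ≥ 1
-- (the only way Source B uses it): take the element once the countdown hits 0, then restart at k-1.
def strideEvery : List Int → Nat → Nat → List Int
  | [], _, _ => []
  | x :: xs, 0, k => x :: strideEvery xs (k - 1) k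
  | _ :: xs, j + 1, k => strideEvery xs j k

def sqrt_partition_alt (items : List Int) (min_group : Int) : List (List Int) :=
  let n : Int := items.length
  if n ≤ min_group then [items]
  else
    let k : Int := max min_group (Int.ofNat (Nat.sqrt items.length))
    -- return [items[j::k] for j in range(k)]
    (List.range k.toNat).map (fun j => strideEvery items j k.toNat)

-- ===== PRECONDITION & SPEC =====
def Spec_sqrt_partition (items : List Int) (min_group : Int) (out : List (List Int)) : Prop := out = sqrt_partition_alt items min_group
instance (items : List Int) (min_group : Int) (out : List (List Int)) : Decidable (Spec_sqrt_partition items min_group out) := by unfold Spec_sqrt_partition; infer_instance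

-- ===== CLAIM (what is proved, stated in full; the proofs are below) =====
def Claim_equal_sqrt_partition : Prop := ∀ (items : List Int) (min_group : Int), Dom_sqrt_partition items min_group → Spec_sqrt_partition items min_group (sqrt_partition items min_group)

-- ===== LEMMAS AND PROOFS =====

-- distance (mod K) from current phase r = c % K to the target residue j
def pvDist (r j K : Nat) : Nat := (j + K - r) % K

lemma pvDist_eq (r j K : Nat) (hr : r < K) (hj : j < K) :
    pvDist r j K = if r ≤ j then j - r else j + K - r := by
  unfold pvDist
  split
  · have h : j + K - r = (j - r) + K := by omega
    rw [h, Nat.add_mod_right]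
    exact Nat.mod_eq_of_lt (by omega)
  · exact Nat.mod_eq_of_lt (by omega)

lemma succ_mod_var (c K : Nat) (hK : 0 < K) :
    (c + 1) % K = if c % K + 1 = K then 0 else c % K + 1 := by
  have h := Nat.mod_lt c hK
  have hdm : K * (c / K) + c % K = c := Nat.div_add_mod c K
  conv_lhs => rw [show c + 1 = K * (c / K) + (c % K + 1) from by omega]
  rw [Nat.mul_add_mod]
  split
  · simp [*]
  · exact Nat.mod_eq_of_lt (by omega)

lemma fold_length (ps : List (Int × Int)) (K : Int) (gs : List (List Int)) :
    (ps.foldl (fun gs p => gs.modify (PySem.Int.mod p.1 K).toNat (fun g => g ++ [p.2])) gs).length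
      = gs.length := by
  induction ps generalizing gs with
  | nil => rfl
  | cons p ps ih => simp [List.foldl_cons, ih, List.length_modify]

lemma fold_getElem? (ps : List (Int × Int)) (K : Int) (gs : List (List Int)) (j : Nat) :
    (ps.foldl (fun gs p => gs.modify (PySem.Int.mod p.1 K).toNat (fun g => g ++ [p.2])) gs)[j]?
      = (gs[j]?).map
          (fun g => g ++ (ps.filter (fun p => (PySem.Int.mod p.1 K).toNat == j)).map Prod.snd) := by
  induction ps generalizing gs with
  | nil => simp
  | cons p ps ih =>
    rw [List.foldl_cons, ih, List.getElem?_modify, List.filter_cons]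
    by_cases h : (PySem.Int.mod p.1 K).toNat = j
    · cases hg : gs[j]? <;> simp [h]
    · cases hg : gs[j]? <;> simp [h]

lemma filter_enum_stride (xs : List Int) :
    ∀ (c K j : Nat), 0 < K → j < K →
    ((PySem.List.enumerate xs (c : Int)).filter
        (fun p => (PySem.Int.mod p.1 (K : Int)).toNat == j)).map Prod.snd
      = strideEvery xs (pvDist (c % K) j K) K := by
  induction xs with
  | nil => intro c K j _ _; simp [PySem.List.enumerate, strideEvery]
  | cons x xs ih =>
    intro c K j hK hj
    have hrlt : c % K < K := Nat.mod_lt c hK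
    have hmod : (PySem.Int.mod (c : Int) (K : Int)).toNat = c % K := by
      rw [PySem.Int.mod_natCast]; exact Int.toNat_natCast _
    have hr' := succ_mod_var c K hK
    rw [PySem.List.enumerate_cons, List.filter_cons,
        show ((c : Int) + 1) = ((c + 1 : Nat) : Int) from by push_cast; ring]
    by_cases h : c % K = j
    · have hb : ((PySem.Int.mod (c : Int) (K : Int)).toNat == j) = true := by rw [hmod]; simp [h]
      rw [if_pos hb, List.map_cons, ih (c + 1) K j hK hj]
      have h0 : pvDist (c % K) j K = 0 := by
        rw [pvDist_eq _ _ _ hrlt hj]; split_ifs <;> omega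
      have hD : pvDist ((c + 1) % K) j K = K - 1 := by
        by_cases hc : c % K + 1 = K
        · rw [hr', if_pos hc, pvDist_eq _ _ _ hK hj]; split_ifs <;> omega
        · rw [hr', if_neg hc, pvDist_eq _ _ _ (by omega) hj]; split_ifs <;> omega
      rw [hD, h0]
      rfl
    · have hb : ((PySem.Int.mod (c : Int) (K : Int)).toNat == j) = false := by rw [hmod]; simp [h]
      rw [if_neg (by rw [hb]; exact Bool.false_ne_true), ih (c + 1) K j hK hj]
      have hne : pvDist (c % K) j K ≠ 0 := by
        rw [pvDist_eq _ _ _ hrlt hj]; split_ifs <;> omega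
      have hD : pvDist ((c + 1) % K) j K = pvDist (c % K) j K - 1 := by
        by_cases hc : c % K + 1 = K
        · rw [hr', if_pos hc, pvDist_eq _ _ _ hK hj, pvDist_eq _ _ _ hrlt hj]
          split_ifs <;> omega
        · rw [hr', if_neg hc, pvDist_eq _ _ _ (by omega) hj, pvDist_eq _ _ _ hrlt hj]
          split_ifs <;> omega
      obtain ⟨d, hd⟩ : ∃ d, pvDist (c % K) j K = d + 1 :=
        ⟨pvDist (c % K) j K - 1, by omega⟩
      rw [hD, hd]
      simp [strideEvery]

lemma strideEvery_ne_nil (xs : List Int) :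
    ∀ (j K : Nat), j < xs.length → strideEvery xs j K ≠ [] := by
  induction xs with
  | nil => intro j K h; simp at h
  | cons x xs ih =>
    intro j K h
    cases j with
    | zero => simp [strideEvery]
    | succ j => exact ih j K (by simpa using h)

-- the core identity: for the k computed in the else branch, bucket fold = strided slices
lemma core (items : List Int) (K : Nat) (hK : K ≤ items.length) :
    (((PySem.List.enumerate items).foldl
        (fun gs p => gs.modify (PySem.Int.mod p.1 (K : Int)).toNat (fun g => g ++ [p.2]))
        (List.replicate K [])).filter (fun g => !g.isEmpty))
      = (List.range K).map (fun j => strideEvery items j K) := by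
  rcases Nat.eq_zero_or_pos K with h0 | hpos
  · subst h0
    -- the fold over enumerate items into an empty group list stays empty
    have hnil : ∀ (ps : List (Int × Int)),
        (ps.foldl (fun (gs : List (List Int)) p =>
          gs.modify (PySem.Int.mod p.1 ((0 : Nat) : Int)).toNat (fun g => g ++ [p.2])) []) = [] := by
      intro ps; induction ps with
      | nil => rfl
      | cons p ps ih => simpa using ih
    rw [show List.replicate 0 ([] : List Int) = [] from rfl, hnil]
    simp
  · set G := ((PySem.List.enumerate items).foldl
        (fun gs p => gs.modify (PySem.Int.mod p.1 (K : Int)).toNat (fun g => g ++ [p.2]))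
        (List.replicate K [])) with hG
    have hlen : G.length = K := by rw [hG, fold_length, List.length_replicate]
    have hget : ∀ j : Nat, j < K → G[j]? = some (strideEvery items j K) := by
      intro j hj
      have he : PySem.List.enumerate items = PySem.List.enumerate items ((0 : Nat) : Int) := by
        norm_num [PySem.List.enumerate]
      rw [hG, he, fold_getElem?, List.getElem?_replicate, if_pos hj]
      have hf := filter_enum_stride items 0 K j hpos hj
      rw [Nat.zero_mod, pvDist_eq _ _ _ hpos hj, if_pos (Nat.zero_le j), Nat.sub_zero] at hf
      simp only [Option.map_some, List.nil_append, hf]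
    have hGeq : G = (List.range K).map (fun j => strideEvery items j K) := by
      apply List.ext_getElem?
      intro j
      by_cases hj : j < K
      · rw [hget j hj, List.getElem?_map, List.getElem?_range hj]
        rfl
      · rw [List.getElem?_eq_none (by omega : G.length ≤ j),
            List.getElem?_eq_none (by simpa using (by omega : K ≤ j))]
    rw [hGeq, List.filter_eq_self.mpr]
    intro g hg
    simp only [List.mem_map, List.mem_range] at hg
    obtain ⟨j, hj, rfl⟩ := hg
    simpa using strideEvery_ne_nil items j K (by omega)

-- k = max min_group √n is at most n once the guard n ≤ min_group fails (n ≥ 1)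
lemma k_le (items : List Int) (min_group : Int) (h : ¬ ((items.length : Int) ≤ min_group)) :
    (max min_group (Int.ofNat (Nat.sqrt items.length))).toNat ≤ items.length := by
  have hs : Nat.sqrt items.length ≤ items.length := Nat.sqrt_le_self _
  have : max min_group (Int.ofNat (Nat.sqrt items.length)) ≤ (items.length : Int) := by
    apply max_le (by omega)
    rw [Int.ofNat_eq_natCast]
    exact_mod_cast hs
  omega

-- ===== VERDICT (by name: the statement is the Claim_ definition above) =====
theorem sqrt_partition_spec : Claim_equal_sqrt_partition := by
  intro items min_group _
  unfold Spec_sqrt_partition sqrt_partition sqrt_partition_alt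
  by_cases h : ((items.length : Int) ≤ min_group)
  · simp [h]
  · simp only [h, if_false]
    have hk0 : (0 : Int) ≤ max min_group (Int.ofNat (Nat.sqrt items.length)) :=
      le_trans (by rw [Int.ofNat_eq_natCast]; exact Int.natCast_nonneg _) (le_max_right _ _)
    rw [show max min_group (Int.ofNat (Nat.sqrt items.length))
          = (((max min_group (Int.ofNat (Nat.sqrt items.length))).toNat : Nat) : Int)
        from (Int.toNat_of_nonneg hk0).symm]
    simp only [Int.toNat_natCast]
    exact core items _ (k_le items min_group h)
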